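-- pv_equiv track=rewrite | github.com/sodafoundation/delfin | delfin/drivers/ibm/ds8k/ds8k.py | division_port_wwn
-- ===== SOURCE A (Python) =====
-- def division_port_wwn(original_wwn):
--     result_wwn = None
--     if not original_wwn:
--         return result_wwn
--     is_first = True
--     for i in range(0, len(original_wwn), 2):
--         if is_first is True:
--             result_wwn = '%s' % (original_wwn[i:i + 2])
--             is_first = False
--         else:
--             result_wwn = '%s:%s' % (result_wwn, original_wwn[i:i + 2])
--     return result_wwn
-- ===== SOURCE B (Python) =====
-- def division_port_wwn(original_wwn):
--     if not original_wwn: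
--         return None
--     chars = []
--     for i, ch in enumerate(original_wwn):
--         if i and i % 2 == 0:
--             chars.append(':')
--         chars.append(ch)
--     return ''.join(chars)
-- ===== Notes on version B (the rewrite author's own statement) =====
-- stated objective: faster
-- what changed: Replaces A's pair-slicing loop over range(0,len,2) with an is_first flag and repeated %-format string concatenation by a single per-character enumerate pass that appends a colon separator before each character at a nonzero even index, joined once at the end.
import Mathlib
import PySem

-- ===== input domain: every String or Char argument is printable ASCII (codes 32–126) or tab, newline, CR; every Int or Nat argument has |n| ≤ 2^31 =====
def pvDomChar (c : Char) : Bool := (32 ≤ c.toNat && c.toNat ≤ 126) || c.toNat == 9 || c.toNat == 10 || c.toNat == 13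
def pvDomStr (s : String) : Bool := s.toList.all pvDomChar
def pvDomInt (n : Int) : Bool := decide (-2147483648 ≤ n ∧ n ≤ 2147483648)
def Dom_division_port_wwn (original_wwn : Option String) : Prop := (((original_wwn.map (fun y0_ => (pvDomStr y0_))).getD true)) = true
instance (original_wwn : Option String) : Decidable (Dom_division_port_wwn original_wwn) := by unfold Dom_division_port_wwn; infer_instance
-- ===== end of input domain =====

-- B replaces A's pair-slicing loop (is_first flag + repeated %-format concatenation) by a single
-- per-character pass that inserts a colon before every character at a nonzero even index, joined once
-- (idiomatic; return values proved equal).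


-- ===== PORT A =====
-- literal port: loop over range(0, len(s), 2) with state (result_wwn, is_first)
def division_port_wwn (original_wwn : Option String) : Option String :=
  let result_wwn : Option String := none
  match original_wwn with
  | none => result_wwn
  | some s =>
    if s.toList = [] then result_wwn    -- 'if not original_wwn'
    else
      ((PySem.List.pyRange 0 (PySem.Str.len s) 2).foldl
        (fun (st : Option String × Bool) i =>
          if st.2 = true then
            (some (PySem.Str.slice s (some i) (some (i + 2))), false)
          else
            (some ((st.1.getD "") ++ ":" ++ PySem.Str.slice s (some i) (some (i + 2))), false))
        (result_wwn, true)).1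

-- ===== PORT B =====
-- literal port of Source B: one pass over enumerate(s) accumulating chars, ':' inserted at each
-- nonzero even index; ''.join(chars) is the final String.mk of the accumulated char list
def division_port_wwn_alt (original_wwn : Option String) : Option String :=
  match original_wwn with
  | none => none
  | some s =>
    if s.toList = [] then none          -- 'if not original_wwn'
    else
      some (String.ofList
        ((PySem.List.enumerate s.toList 0).foldl
          (fun (chars : List Char) p =>
            if p.1 ≠ 0 ∧ PySem.Int.mod p.1 2 = 0 then chars ++ [':', p.2]
            else chars ++ [p.2])
          []))

-- ===== PRECONDITION & SPEC =====
def Spec_division_port_wwn (original_wwn : Option String) (out : Option String) : Prop := out = division_port_wwn_alt original_wwn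
instance (original_wwn : Option String) (out : Option String) : Decidable (Spec_division_port_wwn original_wwn out) := by unfold Spec_division_port_wwn; infer_instance

-- ===== CLAIM (what is proved, stated in full; the proofs are below) =====
def Claim_equal_division_port_wwn : Prop := ∀ (original_wwn : Option String), Dom_division_port_wwn original_wwn → Spec_division_port_wwn original_wwn (division_port_wwn original_wwn)

-- ===== LEMMAS AND PROOFS =====

-- common normal form: chars of the answer, inserting ':' before each later pair
def pvH : List Char → List Char
  | [] => []
  | [a] => [':', a]
  | a :: b :: rest => ':' :: a :: b :: pvH rest

-- the 2-char chunks of a list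
def pvChunks : List Char → List (List Char)
  | [] => []
  | [a] => [[a]]
  | a :: b :: rest => [a, b] :: pvChunks rest

theorem pvH_ne (l : List Char) (h : l ≠ []) :
    pvH l = ':' :: (l.take 2 ++ pvH (l.drop 2)) := by
  match l with
  | [a] => rfl
  | a :: b :: rest => rfl

theorem pvChunks_ne (l : List Char) (h : l ≠ []) : pvChunks l ≠ [] := by
  match l with
  | [a] => simp [pvChunks]
  | a :: b :: rest => simp [pvChunks]

-- range(0, n, 2) as a mapped List.range
theorem pyRange_two_zero (n : Nat) (h : 0 < n) :
    PySem.List.pyRange 0 (n : Int) 2 = (List.range ((n + 1) / 2)).map (fun k => ((2 * k : Nat) : Int)) := by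
  rw [PySem.List.pyRange_of_pos _ _ (by norm_num)]
  have h2 : ((((n : Int) - 0 + 2 - 1) / 2).toNat) = (n + 1) / 2 := by omega
  rw [if_pos (by exact_mod_cast h), h2]
  apply List.map_congr_left; intro k _; push_cast; ring

-- once is_first is false, A's loop is a plain fold of '... ++ ":" ++ chunk'
theorem foldl_after_first (ks : List Nat) (g : Nat → String) (r : String) :
    (ks.foldl
        (fun (st : Option String × Bool) k =>
          if st.2 = true then (some (g k), false)
          else (some ((st.1.getD "") ++ ":" ++ g k), false))
        (some r, false)) = (some (ks.foldl (fun acc k => acc ++ ":" ++ g k) r), false) := by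
  induction ks generalizing r with
  | nil => rfl
  | cons k kt ih => simp only [List.foldl_cons]; exact ih _

-- join absorbs a chunk already glued onto the head
theorem join_absorb (p q : List Char) (rest : List (List Char)) :
    PySem.Chars.join [':'] ((p ++ [':'] ++ q) :: rest) = p ++ [':'] ++ PySem.Chars.join [':'] (q :: rest) := by
  cases rest with
  | nil => rw [PySem.Chars.join_singleton, PySem.Chars.join_singleton]
  | cons x xt => rw [PySem.Chars.join_cons_cons, PySem.Chars.join_cons_cons]; simp

-- the ':'-fold equals a join over the chunk strings
theorem foldl_colon_join (ks : List Nat) (g : Nat → String) (r : String) :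
    (ks.foldl (fun acc k => acc ++ ":" ++ g k) r).toList =
      PySem.Chars.join [':'] (r.toList :: ks.map (fun k => (g k).toList)) := by
  induction ks generalizing r with
  | nil => rw [List.foldl_nil, List.map_nil, PySem.Chars.join_singleton]
  | cons k kt ih =>
    rw [List.foldl_cons, ih, List.map_cons]
    have h1 : (r ++ ":" ++ g k).toList = r.toList ++ [':'] ++ (g k).toList := by
      simp [String.toList_append]
    rw [h1, join_absorb]
    rw [PySem.Chars.join_cons_cons]

-- the mapped range of 2-char slices IS pvChunks
theorem chunks_eq (l : List Char) :
    (List.range ((l.length + 1) / 2)).map (fun k => (l.drop (2 * k)).take 2) = pvChunks l := by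
  induction l using pvChunks.induct with
  | case1 => rfl
  | case2 a => simp [pvChunks]
  | case3 a b rest ih =>
    have hlen : ((a :: b :: rest).length + 1) / 2 = (rest.length + 1) / 2 + 1 := by
      simp only [List.length_cons]; omega
    rw [hlen, List.range_succ_eq_map, List.map_cons, List.map_map]
    show ((a :: b :: rest).drop 0).take 2 :: _ = _
    rw [List.drop_zero]
    show [a, b] :: _ = pvChunks (a :: b :: rest)
    show [a, b] :: _ = [a, b] :: pvChunks rest
    refine congrArg (List.cons [a, b]) ?_
    rw [← ih]
    apply List.map_congr_left; intro k _
    simp only [Function.comp_apply]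
    have h2 : 2 * (k + 1) = (2 * k) + 1 + 1 := by omega
    rw [h2, List.drop_succ_cons, List.drop_succ_cons]

-- joining the chunks with ':' gives the normal form
theorem join_chunks (l : List Char) (h : l ≠ []) :
    PySem.Chars.join [':'] (pvChunks l) = l.take 2 ++ pvH (l.drop 2) := by
  induction l using pvChunks.induct with
  | case1 => exact absurd rfl h
  | case2 a => rfl
  | case3 a b rest ih =>
    show PySem.Chars.join [':'] ([a, b] :: pvChunks rest) = [a, b] ++ pvH rest
    by_cases hr : rest = []
    · subst hr; rfl
    · obtain ⟨x, xt, hx⟩ := List.exists_cons_of_ne_nil (pvChunks_ne rest hr)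
      rw [hx, PySem.Chars.join_cons_cons, ← hx, ih hr, pvH_ne rest hr]
      simp

-- B's loop-body condition, decided at a zero, a nonzero even, and an odd index
theorem cond_even (i : Int) (c : Char) (h1 : i ≠ 0) (h2 : i % 2 = 0) :
    ((i, c).1 ≠ 0 ∧ PySem.Int.mod (i, c).1 2 = 0) :=
  ⟨h1, by rw [PySem.Int.mod_eq_emod_of_pos (by norm_num)]; exact h2⟩

theorem cond_odd (i : Int) (c : Char) (h2 : i % 2 = 1) :
    ¬((i, c).1 ≠ 0 ∧ PySem.Int.mod (i, c).1 2 = 0) := by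
  rintro ⟨-, hm⟩
  rw [PySem.Int.mod_eq_emod_of_pos (by norm_num)] at hm
  simp only at hm
  omega

theorem cond_zero (c : Char) :
    ¬(((0 : Int), c).1 ≠ 0 ∧ PySem.Int.mod ((0 : Int), c).1 2 = 0) := by
  simp

-- B's tail loop: from any even start index ≥ 2, the fold appends pvH
theorem alt_tail (l : List Char) (k : Nat) (acc : List Char) :
    (PySem.List.enumerate l ((2 * k + 2 : Nat) : Int)).foldl
        (fun (chars : List Char) p =>
          if p.1 ≠ 0 ∧ PySem.Int.mod p.1 2 = 0 then chars ++ [':', p.2]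
          else chars ++ [p.2])
        acc = acc ++ pvH l := by
  induction l using pvH.induct generalizing k acc with
  | case1 => simp [PySem.List.enumerate_nil, pvH]
  | case2 a =>
    rw [PySem.List.enumerate_cons, PySem.List.enumerate_nil, List.foldl_cons, List.foldl_nil]
    rw [if_pos (cond_even ((2 * k + 2 : Nat) : Int) a (by omega) (by omega))]
    rfl
  | case3 a b rest ih =>
    rw [PySem.List.enumerate_cons, PySem.List.enumerate_cons, List.foldl_cons, List.foldl_cons]
    rw [if_neg (cond_odd (((2 * k + 2 : Nat) : Int) + 1) b (by omega))]
    rw [if_pos (cond_even ((2 * k + 2 : Nat) : Int) a (by omega) (by omega))]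
    have h2 : ((2 * k + 2 : Nat) : Int) + 1 + 1 = ((2 * (k + 1) + 2 : Nat) : Int) := by
      push_cast; ring
    rw [h2, ih (k + 1)]
    simp [pvH]

-- B's whole loop computes the normal form
theorem alt_chars (l : List Char) (h : l ≠ []) :
    (PySem.List.enumerate l 0).foldl
        (fun (chars : List Char) p =>
          if p.1 ≠ 0 ∧ PySem.Int.mod p.1 2 = 0 then chars ++ [':', p.2]
          else chars ++ [p.2])
        [] = l.take 2 ++ pvH (l.drop 2) := by
  match l with
  | [a] =>
    rw [PySem.List.enumerate_cons, PySem.List.enumerate_nil, List.foldl_cons, List.foldl_nil]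
    rw [if_neg (cond_zero a)]
    rfl
  | a :: b :: rest =>
    rw [PySem.List.enumerate_cons, PySem.List.enumerate_cons, List.foldl_cons, List.foldl_cons]
    rw [if_neg (cond_odd ((0 : Int) + 1) b (by omega))]
    rw [if_neg (cond_zero a)]
    have h2 : (0 : Int) + 1 + 1 = ((2 * 0 + 2 : Nat) : Int) := by norm_num
    rw [h2, alt_tail rest 0]
    show _ = [a, b] ++ pvH rest
    simp

-- ===== VERDICT (by name: the statement is the Claim_ definition above) =====
theorem division_port_wwn_spec : Claim_equal_division_port_wwn := by
  intro w _
  unfold Spec_division_port_wwn division_port_wwn division_port_wwn_alt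
  cases w with
  | none => rfl
  | some s =>
    by_cases h : s.toList = []
    · simp [h]
    · simp only [if_neg h]
      have hn : 0 < s.toList.length := List.length_pos_iff.mpr h
      obtain ⟨m, hm⟩ : ∃ m, (s.toList.length + 1) / 2 = m + 1 := ⟨(s.toList.length + 1) / 2 - 1, by omega⟩
      rw [PySem.Str.len_eq, pyRange_two_zero _ hn, hm, List.range_succ_eq_map]
      rw [List.foldl_map, List.foldl_cons]
      simp only [if_true]
      rw [List.foldl_map, foldl_after_first]
      apply congrArg some
      apply String.toList_inj.mp
      rw [foldl_colon_join, alt_chars _ h]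
      have hsl : ∀ k : Nat, (PySem.Str.slice s (some ((2 * k : Nat) : Int)) (some (((2 * k : Nat) : Int) + 2))).toList = (s.toList.drop (2 * k)).take 2 := by
        intro k
        rw [show (((2 * k : Nat) : Int) + 2) = (((2 * k + 2 : Nat)) : Int) by push_cast; ring]
        rw [PySem.Str.toList_slice, PySem.Chars.slice_eq_listSlice, PySem.List.slice_natCast]
        congr 1
        omega
      have hback : ((PySem.Str.slice s (some ((2 * 0 : Nat) : Int)) (some (((2 * 0 : Nat) : Int) + 2))).toList ::
            (List.range m).map (fun k => (PySem.Str.slice s (some ((2 * k.succ : Nat) : Int)) (some (((2 * k.succ : Nat) : Int) + 2))).toList)) =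
          (List.range (m + 1)).map (fun k => (s.toList.drop (2 * k)).take 2) := by
        rw [List.range_succ_eq_map, List.map_cons, List.map_map]
        refine congrArg₂ List.cons (hsl 0) ?_
        apply List.map_congr_left
        intro k _
        simpa using hsl (k + 1)
      rw [hback, ← hm, chunks_eq, join_chunks _ h]
      exact String.toList_ofList.symm
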